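-- pv_equiv track=rewrite | github.com/LANneeer/algorithms | yandex_prep/finding_word_by_pattern.py | my_match
-- ===== SOURCE A (Python) =====
-- def my_match(pattern: str, arr: list[str]):
--     output = []
--     if len(pattern) < 1:
--         return arr
--     for str in arr:
--         cur = 0
--         for char in str:
--             if pattern[cur] == char:
--                 cur += 1
--
--                 if cur == len(pattern):
--                     output.append(str)
--                     break
--     return output
-- ===== SOURCE B (Python) =====
-- def my_match(pattern: str, arr: list[str]):
--     if len(pattern) < 1:
--         return arr
--     output = []
--     for s in arr:
--         # inverted index: char -> ascending list of its positions in s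
--         index = {}
--         for i, c in enumerate(s):
--             index.setdefault(c, []).append(i)
--         lo = 0
--         ok = True
--         for ch in pattern:
--             positions = index.get(ch, [])
--             # binary search: first position >= lo
--             a, b = 0, len(positions)
--             while a < b:
--                 m = (a + b) // 2
--                 if positions[m] < lo:
--                     a = m + 1
--                 else:
--                     b = m
--             if a == len(positions):
--                 ok = False
--                 break
--             lo = positions[a] + 1
--         if ok:
--             output.append(s)
--     return output
-- ===== Notes on version B (the rewrite author's own statement) =====
-- stated objective: alternative
-- what changed: B builds, per string, an inverted index mapping each character to its ascending list of positions and then advances through the pattern by binary-searching that index for the next position, instead of A's single left-to-right scan with a pattern cursor.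
import Mathlib
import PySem

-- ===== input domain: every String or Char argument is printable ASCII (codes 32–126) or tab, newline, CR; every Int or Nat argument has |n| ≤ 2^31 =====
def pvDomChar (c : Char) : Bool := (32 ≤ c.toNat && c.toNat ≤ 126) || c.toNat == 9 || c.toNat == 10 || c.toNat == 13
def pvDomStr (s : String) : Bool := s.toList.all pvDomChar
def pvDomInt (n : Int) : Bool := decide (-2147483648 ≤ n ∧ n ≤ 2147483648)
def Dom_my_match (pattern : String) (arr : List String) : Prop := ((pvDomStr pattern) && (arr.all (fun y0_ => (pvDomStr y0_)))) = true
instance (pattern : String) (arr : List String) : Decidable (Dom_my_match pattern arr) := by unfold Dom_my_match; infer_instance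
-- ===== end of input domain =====

-- B replaces A's left-to-right scan with a pattern cursor by an inverted index
-- (char → ascending positions) per string, advanced through the pattern by binary search
-- (alternative data structure, same observable result).

-- ===== PORT A =====
-- inner 'for char in str' loop; cur < p.length is an invariant of A (the break fires when cur reaches len),
-- so pattern[cur] is ported as p[cur]? compared by 'some'
def aLoop (p : List Char) (cur : Nat) : List Char → Bool
  | [] => false
  | c :: rest =>
      if p[cur]? = some c then
        if cur + 1 = p.length then true else aLoop p (cur + 1) rest
      else aLoop p cur rest

def my_match (pattern : String) (arr : List String) : List String :=
  if PySem.Str.len pattern < 1 then arr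
  else
    arr.foldl (fun output s => if aLoop pattern.toList 0 s.toList then output ++ [s] else output) []

-- ===== PORT B =====
-- 'index.setdefault(c, []).append(i)' over 'enumerate(s)' is exactly Dict.modify c [] (· ++ [i])
def buildIndex (s : List Char) : PySem.Dict Char (List Int) :=
  (PySem.List.enumerate s).foldl (fun d p => d.modify p.2 [] (· ++ [p.1])) PySem.Dict.empty

-- the hand-written 'while a < b' binary search of Source B; positions[m] is in range whenever
-- the loop reads it (0 ≤ a ≤ m < b ≤ len), so it is ported as getD m 0; the loop is made
-- structural with fuel b - a (each iteration shrinks b - a, so the fuel never runs out)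
def bsGo (ps : List Int) (lo : Int) : Nat → Nat → Nat → Nat
  | 0, a, _ => a
  | fuel + 1, a, b =>
      if a < b then
        let m := (a + b) / 2
        if ps.getD m 0 < lo then bsGo ps lo fuel (m + 1) b else bsGo ps lo fuel a m
      else a

def bs (ps : List Int) (lo : Int) (a b : Nat) : Nat := bsGo ps lo (b - a) a b

-- the 'for ch in pattern' loop with its ok/break flow as structural recursion
def bTest (d : PySem.Dict Char (List Int)) : List Char → Int → Bool
  | [], _ => true
  | ch :: ps, lo =>
      let positions := d.getD ch []
      let a := bs positions lo 0 positions.length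
      if a = positions.length then false
      else bTest d ps (positions.getD a 0 + 1)

def my_match_alt (pattern : String) (arr : List String) : List String :=
  if PySem.Str.len pattern < 1 then arr
  else
    arr.foldl (fun output s => if bTest (buildIndex s.toList) pattern.toList 0 then output ++ [s] else output) []

-- ===== PRECONDITION & SPEC =====
def Spec_my_match (pattern : String) (arr : List String) (out : List String) : Prop := out = my_match_alt pattern arr
instance (pattern : String) (arr : List String) (out : List String) : Decidable (Spec_my_match pattern arr out) := by unfold Spec_my_match; infer_instance

-- ===== CLAIM (what is proved, stated in full; the proofs are below) =====
def Claim_equal_my_match : Prop := ∀ (pattern : String) (arr : List String), Dom_my_match pattern arr → Spec_my_match pattern arr (my_match pattern arr)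

-- ===== LEMMAS AND PROOFS =====

-- canonical greedy subsequence test both loops are proved equal to
def subq : List Char → List Char → Bool
  | [], _ => true
  | _ :: _, [] => false
  | p :: ps, c :: cs => if p = c then subq ps cs else subq (p :: ps) cs

-- positions of ch in s, offset by k (the spec of buildIndex's lists)
def posFrom (ch : Char) : Int → List Char → List Int
  | _, [] => []
  | k, c :: cs => if c = ch then k :: posFrom ch (k + 1) cs else posFrom ch (k + 1) cs

theorem aLoop_eq_subq (p : List Char) :
    ∀ (s : List Char) (cur : Nat), cur < p.length → aLoop p cur s = subq (p.drop cur) s := by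
  intro s
  induction s with
  | nil =>
      intro cur h
      have : p.drop cur ≠ [] := by
        simp [List.drop_eq_nil_iff]; omega
      cases hd : p.drop cur with
      | nil => exact absurd hd this
      | cons a t => simp [aLoop, subq]
  | cons c rest ih =>
      intro cur h
      have hdrop : p.drop cur = p[cur] :: p.drop (cur + 1) := by
        rw [List.drop_eq_getElem_cons h]
      rw [hdrop]
      simp only [aLoop, subq]
      by_cases hc : p[cur] = c
      · have hget : p[cur]? = some c := by rw [List.getElem?_eq_getElem h, hc]
        rw [if_pos hget, if_pos hc]
        by_cases hend : cur + 1 = p.length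
        · have hnil : p.drop (cur + 1) = [] := by simp [List.drop_eq_nil_iff]; omega
          rw [if_pos hend, hnil]
          simp [subq]
        · rw [if_neg hend, ih (cur + 1) (by omega)]
      · have hget : p[cur]? ≠ some c := by
          rw [List.getElem?_eq_getElem h]; simp [hc]
        rw [if_neg hget, if_neg hc, ih cur h, hdrop]

theorem subq_of_notMem (ch : Char) (ps : List Char) :
    ∀ t : List Char, ch ∉ t → subq (ch :: ps) t = false := by
  intro t
  induction t with
  | nil => intro _; simp [subq]
  | cons c r ih =>
      intro h
      have h1 : ch ≠ c := by intro e; exact h (by simp [e])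
      have h2 : ch ∉ r := fun m => h (by simp [m])
      simp [subq, h1, ih h2]

theorem subq_greedy (ch : Char) (ps : List Char) :
    ∀ (t : List Char) (k : Nat), t[k]? = some ch → (∀ j, j < k → t[j]? ≠ some ch) →
      subq (ch :: ps) t = subq ps (t.drop (k + 1)) := by
  intro t
  induction t with
  | nil => intro k hk _; simp at hk
  | cons c r ih =>
      intro k hk hmin
      by_cases hc : ch = c
      · have hk0 : k = 0 := by
          by_contra hne
          exact hmin 0 (Nat.pos_of_ne_zero hne) (by simp [hc])
        subst hk0
        simp [subq, hc]
      · cases k with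
        | zero => simp at hk; exact absurd hk.symm hc
        | succ k' =>
            have hk' : r[k']? = some ch := by simpa using hk
            have hmin' : ∀ j, j < k' → r[j]? ≠ some ch := by
              intro j hj
              have := hmin (j + 1) (by omega)
              simpa using this
            have hr : subq (ch :: ps) r = subq ps (r.drop (k' + 1)) := ih k' hk' hmin'
            simp only [subq, List.drop_succ_cons]
            rw [if_neg hc, hr]

-- ---- the inverted index is posFrom ----

theorem enumerate_filter_posFrom (ch : Char) :
    ∀ (s : List Char) (k : Int),
      (((PySem.List.enumerate s k).map Prod.swap).filter (fun p => p.1 == ch)).map (·.2)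
        = posFrom ch k s := by
  intro s
  induction s with
  | nil => intro k; simp [PySem.List.enumerate_nil, posFrom]
  | cons c cs ih =>
      intro k
      rw [PySem.List.enumerate_cons]
      by_cases hc : c = ch
      · simp [posFrom, hc, ih (k + 1)]
      · simp [posFrom, hc, ih (k + 1)]

theorem buildIndex_getD (s : List Char) (ch : Char) :
    (buildIndex s).getD ch [] = posFrom ch 0 s := by
  unfold buildIndex
  have h1 : (PySem.List.enumerate s).foldl (fun d p => d.modify p.2 [] (· ++ [p.1])) PySem.Dict.empty
      = ((PySem.List.enumerate s).map Prod.swap).foldl (fun d p => d.modify p.1 [] (· ++ [p.2])) PySem.Dict.empty := by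
    rw [List.foldl_map]
    rfl
  rw [h1, PySem.Dict.getD_foldl_modify_append, PySem.Dict.getD_empty, List.nil_append,
    enumerate_filter_posFrom]

theorem posFrom_ge (ch : Char) : ∀ (s : List Char) (k : Int), ∀ i ∈ posFrom ch k s, k ≤ i := by
  intro s
  induction s with
  | nil => intro k i hi; simp [posFrom] at hi
  | cons c cs ih =>
      intro k i hi
      by_cases hc : c = ch
      · simp only [posFrom, if_pos hc, List.mem_cons] at hi
        rcases hi with rfl | hi
        · omega
        · have := ih (k + 1) i hi; omega
      · simp only [posFrom, if_neg hc] at hi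
        have := ih (k + 1) i hi; omega

theorem posFrom_pairwise (ch : Char) :
    ∀ (s : List Char) (k : Int), (posFrom ch k s).Pairwise (· < ·) := by
  intro s
  induction s with
  | nil => intro k; simp [posFrom]
  | cons c cs ih =>
      intro k
      by_cases hc : c = ch
      · simp only [posFrom, if_pos hc]
        refine List.Pairwise.cons ?_ (ih (k + 1))
        intro i hi
        have := posFrom_ge ch cs (k + 1) i hi; omega
      · simp only [posFrom, if_neg hc]; exact ih (k + 1)

theorem posFrom_nil_iff (ch : Char) :
    ∀ (s : List Char) (k : Int), posFrom ch k s = [] ↔ ch ∉ s := by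
  intro s
  induction s with
  | nil => intro k; simp [posFrom]
  | cons c cs ih =>
      intro k
      by_cases hc : c = ch
      · simp [posFrom, hc]
      · simp [posFrom, hc, ih (k + 1), Ne.symm hc]

theorem posFrom_dropWhile (ch : Char) :
    ∀ (s : List Char) (k : Int) (lo : Nat),
      (posFrom ch k s).dropWhile (fun x => decide (x < k + (lo : Int)))
        = posFrom ch (k + lo) (s.drop lo) := by
  intro s
  induction s with
  | nil => intro k lo; simp [posFrom]
  | cons c cs ih =>
      intro k lo
      cases lo with
      | zero =>
          simp only [Nat.cast_zero, add_zero, List.drop_zero]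
          cases hpf : posFrom ch k (c :: cs) with
          | nil => simp
          | cons i t =>
              have hmem : i ∈ posFrom ch k (c :: cs) := by rw [hpf]; simp
              have hk : k ≤ i := posFrom_ge ch (c :: cs) k i hmem
              rw [List.dropWhile_cons_of_neg (by simp only [decide_eq_true_eq]; omega)]
      | succ l =>
          have hstep : ∀ t, (k :: t).dropWhile (fun x => decide (x < k + ((l + 1 : Nat) : Int)))
              = t.dropWhile (fun x => decide (x < k + ((l + 1 : Nat) : Int))) := by
            intro t
            rw [List.dropWhile_cons_of_pos (by simp only [decide_eq_true_eq]; push_cast; omega)]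
          have hrec : (posFrom ch (k + 1) cs).dropWhile (fun x => decide (x < k + ((l + 1 : Nat) : Int)))
              = posFrom ch (k + 1 + (l : Int)) (cs.drop l) := by
            have := ih (k + 1) l
            have harith : (k + 1) + (l : Int) = k + ((l + 1 : Nat) : Int) := by push_cast; ring
            rw [harith] at this
            rw [this, harith.symm]
          by_cases hc : c = ch
          · simp only [posFrom, if_pos hc, List.drop_succ_cons]
            rw [hstep, hrec]
            congr 1
            push_cast; ring
          · simp only [posFrom, if_neg hc, List.drop_succ_cons]
            rw [hrec]
            congr 1
            push_cast; ring

theorem posFrom_head (ch : Char) :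
    ∀ (s : List Char) (k : Int) (i : Int), (posFrom ch k s).head? = some i →
      ∃ j : Nat, i = k + j ∧ s[j]? = some ch ∧ ∀ j' : Nat, j' < j → s[j']? ≠ some ch := by
  intro s
  induction s with
  | nil => intro k i h; simp [posFrom] at h
  | cons c cs ih =>
      intro k i h
      by_cases hc : c = ch
      · simp only [posFrom, if_pos hc, List.head?_cons, Option.some.injEq] at h
        exact ⟨0, by omega, by simp [hc], by omega⟩
      · simp only [posFrom, if_neg hc] at h
        obtain ⟨j, hj1, hj2, hj3⟩ := ih (k + 1) i h
        refine ⟨j + 1, by omega, by simpa using hj2, ?_⟩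
        intro j' hj'
        cases j' with
        | zero => simp; exact fun e => hc e
        | succ j'' => simpa using hj3 j'' (by omega)

-- ---- binary search ----

theorem sorted_getD_lt (lo : Int) :
    ∀ (l : List Int), l.Pairwise (· < ·) → ∀ j, j < l.length →
      (l.getD j 0 < lo ↔ j < (l.takeWhile (fun x => decide (x < lo))).length) := by
  intro l
  induction l with
  | nil => intro _ j hj; simp at hj
  | cons c cs ih =>
      intro hp j hj
      have hcs := (List.pairwise_cons.mp hp).2
      have hhead := (List.pairwise_cons.mp hp).1
      by_cases hc : c < lo
      · rw [List.takeWhile_cons_of_pos (by simpa using hc)]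
        cases j with
        | zero => simpa using hc
        | succ j' =>
            have := ih hcs j' (by simpa using hj)
            simpa [List.getD_cons_succ] using this
      · rw [List.takeWhile_cons_of_neg (by simpa using hc)]
        simp only [List.length_nil]
        constructor
        · intro habs
          exfalso
          cases j with
          | zero => simp at habs; omega
          | succ j' =>
              have hj' : j' < cs.length := by simpa using hj
              have hmem : cs.getD j' 0 ∈ cs := by
                rw [List.getD_eq_getElem _ _ hj']
                exact List.getElem_mem hj'
              have := hhead _ hmem
              simp only [List.getD_cons_succ] at habs
              omega
        · omega

theorem bsGo_eq_takeWhile (l : List Int) (lo : Int) (hp : l.Pairwise (· < ·)) :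
    ∀ (fuel a b : Nat), b - a ≤ fuel →
      a ≤ (l.takeWhile (fun x => decide (x < lo))).length →
      (l.takeWhile (fun x => decide (x < lo))).length ≤ b → b ≤ l.length →
      bsGo l lo fuel a b = (l.takeWhile (fun x => decide (x < lo))).length := by
  intro fuel
  induction fuel with
  | zero =>
      intro a b hf h1 h2 h3
      rw [bsGo]
      omega
  | succ fuel ih =>
      intro a b hf h1 h2 h3
      rw [bsGo]
      by_cases h : a < b
      · rw [if_pos h]
        by_cases hlt : l.getD ((a + b) / 2) 0 < lo
        · rw [if_pos hlt]
          have hm : (a + b) / 2 < l.length := by omega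
          have := (sorted_getD_lt lo l hp _ hm).mp hlt
          exact ih _ _ (by omega) (by omega) h2 h3
        · rw [if_neg hlt]
          have hm : (a + b) / 2 < l.length := by omega
          have : ¬ (a + b) / 2 < (l.takeWhile (fun x => decide (x < lo))).length := by
            intro hcon
            exact hlt ((sorted_getD_lt lo l hp _ hm).mpr hcon)
          exact ih _ _ (by omega) h1 (by omega) (by omega)
      · rw [if_neg h]
        omega

theorem bs_eq_takeWhile (l : List Int) (lo : Int) (hp : l.Pairwise (· < ·)) :
    ∀ (a b : Nat), a ≤ (l.takeWhile (fun x => decide (x < lo))).length →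
      (l.takeWhile (fun x => decide (x < lo))).length ≤ b → b ≤ l.length →
      bs l lo a b = (l.takeWhile (fun x => decide (x < lo))).length := by
  intro a b h1 h2 h3
  exact bsGo_eq_takeWhile l lo hp (b - a) a b (Nat.le_refl _) h1 h2 h3

-- ---- the per-string test computes subq ----

theorem bTest_eq_subq (s : List Char) :
    ∀ (pat : List Char) (lo : Nat), lo ≤ s.length →
      bTest (buildIndex s) pat (lo : Int) = subq pat (s.drop lo) := by
  intro pat
  induction pat with
  | nil =>
      intro lo _
      cases hd : s.drop lo with
      | nil => simp [bTest, subq]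
      | cons a t => simp [bTest, subq]
  | cons ch ps ih =>
      intro lo hlo
      rw [bTest]
      simp only [buildIndex_getD]
      set l := posFrom ch 0 s with hl
      set tw := (l.takeWhile (fun x => decide (x < (lo : Int)))).length with htw
      have hpw : l.Pairwise (· < ·) := posFrom_pairwise ch s 0
      have hbs : bs l (lo : Int) 0 l.length = tw := by
        apply bs_eq_takeWhile l (lo : Int) hpw
        · omega
        · exact (List.takeWhile_sublist _).length_le
        · omega
      have hdw : l.dropWhile (fun x => decide (x < (lo : Int))) = posFrom ch (lo : Int) (s.drop lo) := by
        have := posFrom_dropWhile ch s 0 lo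
        simpa using this
      rw [hbs]
      by_cases hend : tw = l.length
      · rw [if_pos hend]
        have hdnil : l.dropWhile (fun x => decide (x < (lo : Int))) = [] := by
          have happ := List.takeWhile_append_dropWhile (p := fun x => decide (x < (lo : Int))) (l := l)
          have hlen := congrArg List.length happ
          simp only [List.length_append] at hlen
          rw [← htw] at hlen
          have : (l.dropWhile (fun x => decide (x < (lo : Int)))).length = 0 := by omega
          exact List.eq_nil_of_length_eq_zero this
        have hnm : ch ∉ s.drop lo := (posFrom_nil_iff ch (s.drop lo) (lo : Int)).mp (by rw [← hdw, hdnil])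
        exact (subq_of_notMem ch ps (s.drop lo) hnm).symm
      · rw [if_neg hend]
        have htwle : tw ≤ l.length := by rw [htw]; exact (List.takeWhile_sublist _).length_le
        have htwlt : tw < l.length := by omega
        -- l.getD tw 0 is the head of the dropWhile part
        have hdrop_eq : l.drop tw = l.dropWhile (fun x => decide (x < (lo : Int))) := by
          conv_lhs => rw [← List.takeWhile_append_dropWhile (p := fun x => decide (x < (lo : Int))) (l := l)]
          rw [List.drop_append_of_le_length (by rw [← htw])]
          have hnil : (l.takeWhile (fun x => decide (x < (lo : Int)))).drop tw = [] := by
            rw [List.drop_eq_nil_iff]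
          rw [hnil, List.nil_append]
        have hhead : (posFrom ch (lo : Int) (s.drop lo)).head? = some (l.getD tw 0) := by
          rw [← hdw, ← hdrop_eq]
          rw [List.getD_eq_getElem _ _ htwlt]
          rw [List.head?_drop]
          rw [List.getElem?_eq_getElem htwlt]
        obtain ⟨j, hj1, hj2, hj3⟩ := posFrom_head ch (s.drop lo) (lo : Int) _ hhead
        have hjlt : j < (s.drop lo).length := (List.getElem?_eq_some_iff.mp hj2).1
        have hslen : (s.drop lo).length = s.length - lo := by simp
        have hgreedy : subq (ch :: ps) (s.drop lo) = subq ps ((s.drop lo).drop (j + 1)) :=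
          subq_greedy ch ps (s.drop lo) j hj2 hj3
        have hdd : (s.drop lo).drop (j + 1) = s.drop (lo + j + 1) := by
          rw [List.drop_drop]; try congr 1
          try omega
        have hcast : l.getD tw 0 + 1 = ((lo + j + 1 : Nat) : Int) := by
          rw [hj1]; try push_cast
          try ring
        rw [hcast, ih (lo + j + 1) (by omega), hgreedy, hdd]

theorem foldl_eq_filter (f : String → Bool) (arr : List String) (init : List String) :
    arr.foldl (fun output s => if f s then output ++ [s] else output) init
      = init ++ arr.filter f := by
  induction arr generalizing init with
  | nil => simp
  | cons x xs ih =>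
      by_cases h : f x
      · simp [List.foldl_cons, h, ih]
      · simp [List.foldl_cons, h, ih]

-- ===== VERDICT (by name: the statement is the Claim_ definition above) =====
theorem my_match_spec : Claim_equal_my_match := by
  intro pattern arr _
  unfold Spec_my_match my_match my_match_alt
  by_cases h : PySem.Str.len pattern < 1
  · rw [if_pos h, if_pos h]
  · rw [if_neg h, if_neg h, foldl_eq_filter, foldl_eq_filter, List.nil_append, List.nil_append]
    apply List.filter_congr
    intro s _
    have hlen : 0 < pattern.toList.length := by
      rcases pattern with ⟨cs⟩
      simp [PySem.Str.len] at h ⊢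
      exact List.length_pos_iff.mpr (by simpa using h)
    rw [aLoop_eq_subq pattern.toList s.toList 0 hlen]
    have hb := bTest_eq_subq s.toList pattern.toList 0 (Nat.zero_le _)
    simp only [Nat.cast_zero, List.drop_zero] at hb
    rw [hb, List.drop_zero]
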